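-- pv_equiv track=rewrite | github.com/sbell8-chwy/euler | p84.py | index_top_three
-- ===== SOURCE A (Python) =====
-- def index_top_three(board):
--     one = (0, 0)
--     two = (0, 0)
--     three = (0, 0)
--     for i in range(len(board)):
--         if board[i] > one[1]:
--             three = two
--             two = one
--             one = (i, board[i])
--         elif board[i] > two[1]:
--             three = two
--             two = (i, board[i])
--         elif board[i] > three[1]:
--             three = (i, board[i])
--     return [one, two, three]
-- ===== SOURCE B (Python) =====
-- def index_top_three(board):
--     pairs = [(i, v) for i, v in enumerate(board) if v > 0]
--     pairs.sort(key=lambda p: p[1], reverse=True)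
--     top = pairs[:3]
--     return top + [(0, 0)] * (3 - len(top))
-- ===== Notes on version B (the rewrite author's own statement) =====
-- stated objective: simpler
-- what changed: Replaces the streaming three-variable selection (shift one/two/three on each element) with build-filter-positive-pairs, one stable descending sort, slice the first three and pad with (0,0).
import Mathlib
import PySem

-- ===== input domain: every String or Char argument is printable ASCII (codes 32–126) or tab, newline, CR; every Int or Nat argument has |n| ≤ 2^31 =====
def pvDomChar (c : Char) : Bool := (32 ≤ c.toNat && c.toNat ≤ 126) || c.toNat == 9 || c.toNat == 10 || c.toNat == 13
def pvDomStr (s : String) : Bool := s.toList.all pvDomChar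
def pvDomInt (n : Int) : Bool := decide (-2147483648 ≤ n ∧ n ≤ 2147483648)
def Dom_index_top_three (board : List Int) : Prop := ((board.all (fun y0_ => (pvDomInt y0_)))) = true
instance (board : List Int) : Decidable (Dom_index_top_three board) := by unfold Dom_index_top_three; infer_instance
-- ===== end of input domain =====

-- B replaces A's streaming three-variable selection with filter-positives, one stable
-- descending sort, slice [:3] and pad with (0,0) — simpler, not faster.

-- ===== PORT A =====
-- A-side helper: the body of A's loop for one index/value pair (branches in A's order).
def pvAStep (st : (Int × Int) × (Int × Int) × (Int × Int)) (p : Int × Int) :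
    (Int × Int) × (Int × Int) × (Int × Int) :=
  if st.1.2 < p.2 then (p, st.1, st.2.1)
  else if st.2.1.2 < p.2 then (st.1, p, st.2.1)
  else if st.2.2.2 < p.2 then (st.1, st.2.1, p)
  else st

-- literal port of A: for i in range(len(board)) with board[i]; pyGetD is exact here
-- (every i of the range is in bounds, so Python's board[i] never raises).
def index_top_three (board : List Int) : List (Int × Int) :=
  let s := (PySem.List.pyRange 0 (PySem.List.len board) 1).foldl
    (fun st i => pvAStep st (i, PySem.List.pyGetD board i 0))
    ((0, 0), (0, 0), (0, 0))
  [s.1, s.2.1, s.2.2]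

-- ===== PORT B =====
def index_top_three_alt (board : List Int) : List (Int × Int) :=
  let pairs := (PySem.List.enumerate board 0).filter (fun p => decide (0 < p.2))
  let sortedPairs := PySem.List.sorted pairs (fun p => p.2) true
  let top := PySem.List.slice sortedPairs none (some 3)
  top ++ PySem.List.pyRepeat [((0 : Int), (0 : Int))] (3 - PySem.List.len top)

-- ===== PRECONDITION & SPEC =====
def Spec_index_top_three (board : List Int) (out : List (Int × Int)) : Prop := out = index_top_three_alt board
instance (board : List Int) (out : List (Int × Int)) : Decidable (Spec_index_top_three board out) := by unfold Spec_index_top_three; infer_instance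

-- ===== CLAIM (what is proved, stated in full; the proofs are below) =====
def Claim_equal_index_top_three : Prop := ∀ (board : List Int), Dom_index_top_three board → Spec_index_top_three board (index_top_three board)

-- ===== LEMMAS AND PROOFS =====

-- B's sorted list of positive (index, value) pairs for a board.
def pvSrt (board : List Int) : List (Int × Int) :=
  PySem.List.sorted ((PySem.List.enumerate board 0).filter (fun p => decide (0 < p.2)))
    (fun p => p.2) true

-- stable-descending insertion of one pair (the foldl step of PySem's reverse sort).
def pvIns (p : Int × Int) (l : List (Int × Int)) : List (Int × Int) :=
  PySem.List.insertBy (fun a b => decide (b.2 < a.2)) p l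

-- the first three entries of a list, padded with the sentinel (0,0).
def pvTop3 (l : List (Int × Int)) : (Int × Int) × (Int × Int) × (Int × Int) :=
  (l.getD 0 (0, 0), l.getD 1 (0, 0), l.getD 2 (0, 0))

lemma pvSrt_append (xs : List Int) (v : Int) :
    pvSrt (xs ++ [v]) =
      if 0 < v then pvIns ((xs.length : Int), v) (pvSrt xs) else pvSrt xs := by
  unfold pvSrt pvIns
  rw [PySem.List.enumerate_append, PySem.List.sorted_rev_eq_foldl_insertBy,
      PySem.List.sorted_rev_eq_foldl_insertBy]
  simp [PySem.List.enumerate_cons, PySem.List.enumerate_nil, List.filter_append]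
  by_cases h : 0 < v <;> simp [h]

lemma pvStep_ins (l : List (Int × Int)) (p : Int × Int)
    (hs : l.Pairwise (fun a b => b.2 ≤ a.2)) (hpos : ∀ q ∈ l, 0 < q.2) :
    pvAStep (pvTop3 l) p = pvTop3 (if 0 < p.2 then pvIns p l else l) := by
  match l with
  | [] =>
      by_cases h : 0 < p.2 <;>
        simp [pvAStep, pvTop3, pvIns, PySem.List.insertBy, h]
  | [a] =>
      have ha : 0 < a.2 := hpos a (by simp)
      by_cases h1 : a.2 < p.2
      · simp [pvAStep, pvTop3, pvIns, PySem.List.insertBy, h1, lt_trans ha h1]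
      · by_cases h2 : 0 < p.2 <;>
          simp [pvAStep, pvTop3, pvIns, PySem.List.insertBy, h1, h2]
  | [a, b] =>
      have ha : 0 < a.2 := hpos a (by simp)
      have hb : 0 < b.2 := hpos b (by simp)
      by_cases h1 : a.2 < p.2
      · simp [pvAStep, pvTop3, pvIns, PySem.List.insertBy, h1, lt_trans ha h1]
      · by_cases h2 : b.2 < p.2
        · simp [pvAStep, pvTop3, pvIns, PySem.List.insertBy, h1, h2, lt_trans hb h2]
        · by_cases h3 : 0 < p.2 <;>
            simp [pvAStep, pvTop3, pvIns, PySem.List.insertBy, h1, h2, h3]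
  | a :: b :: c :: t =>
      have ha : 0 < a.2 := hpos a (by simp)
      have hb : 0 < b.2 := hpos b (by simp)
      have hc : 0 < c.2 := hpos c (by simp)
      by_cases h1 : a.2 < p.2
      · simp [pvAStep, pvTop3, pvIns, PySem.List.insertBy, h1, lt_trans ha h1]
      · by_cases h2 : b.2 < p.2
        · simp [pvAStep, pvTop3, pvIns, PySem.List.insertBy, h1, h2, lt_trans hb h2]
        · by_cases h3 : c.2 < p.2
          · simp [pvAStep, pvTop3, pvIns, PySem.List.insertBy, h1, h2, h3, lt_trans hc h3]
          · by_cases h4 : 0 < p.2 <;>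
              simp [pvAStep, pvTop3, pvIns, PySem.List.insertBy, h1, h2, h3, h4]

lemma pvSrt_pos (board : List Int) : ∀ q ∈ pvSrt board, 0 < q.2 := by
  intro q hq
  unfold pvSrt at hq
  rw [PySem.List.mem_sorted] at hq
  simpa using (List.mem_filter.mp hq).2

lemma pvMain (board : List Int) :
    (PySem.List.pyRange 0 (PySem.List.len board) 1).foldl
      (fun st i => pvAStep st (i, PySem.List.pyGetD board i 0))
      ((0, 0), (0, 0), (0, 0)) = pvTop3 (pvSrt board) := by
  induction board using List.reverseRecOn with
  | nil => decide
  | append_singleton xs v ih =>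
      have hlen : PySem.List.len (xs ++ [v]) = (xs.length : Int) + 1 := by
        simp [PySem.List.len]
      rw [hlen, PySem.List.pyRange_one_succ_right (by positivity), List.foldl_append]
      have hcong :
          (PySem.List.pyRange 0 (xs.length : Int) 1).foldl
            (fun st i => pvAStep st (i, PySem.List.pyGetD (xs ++ [v]) i 0))
            ((0, 0), (0, 0), (0, 0)) =
          (PySem.List.pyRange 0 (xs.length : Int) 1).foldl
            (fun st i => pvAStep st (i, PySem.List.pyGetD xs i 0))
            ((0, 0), (0, 0), (0, 0)) := by
        apply PySem.List.foldl_congr_mem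
        intro acc i hi
        rw [PySem.List.mem_pyRange_one] at hi
        have h1 : i < (xs.length : Int) := hi.2
        have h2 : i < ((xs ++ [v]).length : Int) := by simp; omega
        rw [PySem.List.pyGetD_eq_getElem _ _ hi.1 h2,
            PySem.List.pyGetD_eq_getElem _ _ hi.1 h1,
            List.getElem_append_left (by omega)]
      have hv : PySem.List.pyGetD (xs ++ [v]) (xs.length : Int) 0 = v := by
        rw [PySem.List.pyGetD_eq_getElem _ _ (by positivity) (by simp)]
        simp
      have hlen' : (PySem.List.len xs) = (xs.length : Int) := by simp [PySem.List.len]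
      rw [hcong]
      rw [hlen'] at ih
      rw [ih]
      simp only [List.foldl_cons, List.foldl_nil]
      rw [hv, pvStep_ins (pvSrt xs) ((xs.length : Int), v)
            (PySem.List.sorted_pairwise_rev _ _) (pvSrt_pos xs),
          ← pvSrt_append]

lemma pvPad3 (l : List (Int × Int)) :
    [l.getD 0 (0, 0), l.getD 1 (0, 0), l.getD 2 (0, 0)] =
      PySem.List.slice l none (some 3) ++
        PySem.List.pyRepeat [((0 : Int), (0 : Int))]
          (3 - PySem.List.len (PySem.List.slice l none (some 3))) := by
  rw [PySem.List.slice_to l (by norm_num)]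
  match l with
  | [] => decide
  | [a] => simp [PySem.List.pyRepeat_singleton, PySem.List.len]
  | [a, b] => simp [PySem.List.pyRepeat_singleton, PySem.List.len]
  | a :: b :: c :: t =>
      simp [PySem.List.pyRepeat_singleton, PySem.List.len, List.take]

-- ===== VERDICT (by name: the statement is the Claim_ definition above) =====
theorem index_top_three_spec : Claim_equal_index_top_three := by
  intro board _
  show index_top_three board = index_top_three_alt board
  unfold index_top_three index_top_three_alt
  rw [pvMain board]
  exact pvPad3 (pvSrt board)
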